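-- pv_equiv track=rewrite | github.com/elikaski/BF-it | Compiler.py | get_set_cell_value_code
-- ===== SOURCE A (Python) =====
-- def get_set_cell_value_code(new_value, previous_value, zero_next_cell_if_necessary=True):
--     # this function returns a code that sets the current cell's value to new_value,
--     # given that its previous value is previous_value
--
--     # it may return the "naive" way, of "+"/"-" usage, <offset> times
--     # and it may return an optimization using loops, by using the next cell as a loop counter
--     # if zero_next_cell_if_necessary is set to False, it assumes that the next cell is already 0
--
--     # after the code of this function is executed, the pointer will point to the original cell
--     # this function returns the shorter code between "naive" and "looped"
--
--     offset = new_value - previous_value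
--     char = "+" if offset > 0 else "-"
--     offset = abs(offset)
--
--     # "naive" code is simply +/-, <offset> times
--     naive = char * offset
--
--     # "looped" code is "[<a> times perform <b> adds/subs] and then <c> more adds/subs"
--     def get_abc(offset):
--         # returns a,b,c such that a*b+c=offset and a+b+c is minimal
--
--         min_a, min_b, min_c = offset, 1, 0
--         min_sum = min_a + min_b + min_c
--
--         for i in range(1, offset//2+1):
--             a, b, c = i, offset//i, offset % i
--             curr_sum = a + b + c
--
--             if curr_sum < min_sum:
--                 min_a, min_b, min_c = a, b, c
--                 min_sum = curr_sum
--
--         return min_a, min_b, min_c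
--
--     a, b, c = get_abc(offset)
--     looped = ">"  # point to next cell (loop counter)
--     if zero_next_cell_if_necessary:
--         looped += "[-]"  # zero it if necessary
--     looped += "+" * a  # set loop counter
--     looped += "[-<" + char * b + ">]"  # sub 1 from counter, perform b actions
--     looped += "<"  # point to "character" cell
--     looped += char * c  # c more actions
--
--     if len(naive) < len(looped):
--         return naive
--     else:
--         return looped
-- ===== SOURCE B (Python) =====
-- def get_set_cell_value_code(new_value, previous_value, zero_next_cell_if_necessary=True):
--     # Same result as the original, computed differently:
--     # * the (a,b,c) search enumerates only the O(sqrt(offset)) blocks of constant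
--     #   quotient offset//i; the cost i + offset//i + offset%i is strictly decreasing
--     #   inside a block, so only each block's right endpoint can be the first minimizer
--     #   (this preserves A's smallest-i tie-break);
--     # * the two candidate code lengths are compared arithmetically, and only the
--     #   winning string is materialized.
--     offset = new_value - previous_value
--     char = "+" if offset > 0 else "-"
--     offset = abs(offset)
--
--     best_a, best_b, best_c = offset, 1, 0
--     best_sum = offset + 1
--     n = offset // 2
--     i = 1
--     while i <= n:
--         q = offset // i
--         j = min(offset // q, n)  # largest k <= n with offset//k == q
--         s = j + q + offset % j
--         if s < best_sum:
--             best_a, best_b, best_c, best_sum = j, q, offset % j, s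
--         i = j + 1
--
--     a, b, c = best_a, best_b, best_c
--     prefix = ">[-]" if zero_next_cell_if_necessary else ">"
--     looped_len = len(prefix) + a + 3 + b + 2 + 1 + c
--     if offset < looped_len:
--         return char * offset
--     return prefix + "+" * a + "[-<" + char * b + ">]<" + char * c
-- ===== Notes on version B (the rewrite author's own statement) =====
-- stated objective: faster
-- what changed: The (a,b,c) search scans only the O(sqrt(offset)) constant-quotient blocks of offset//i (the cost i + offset//i + offset%i is strictly decreasing inside a block, so only each block's right endpoint can be the first minimizer, preserving A's smallest-i tie-break), and the naive-vs-looped choice compares lengths arithmetically so only the winning string is built.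
import Mathlib
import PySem

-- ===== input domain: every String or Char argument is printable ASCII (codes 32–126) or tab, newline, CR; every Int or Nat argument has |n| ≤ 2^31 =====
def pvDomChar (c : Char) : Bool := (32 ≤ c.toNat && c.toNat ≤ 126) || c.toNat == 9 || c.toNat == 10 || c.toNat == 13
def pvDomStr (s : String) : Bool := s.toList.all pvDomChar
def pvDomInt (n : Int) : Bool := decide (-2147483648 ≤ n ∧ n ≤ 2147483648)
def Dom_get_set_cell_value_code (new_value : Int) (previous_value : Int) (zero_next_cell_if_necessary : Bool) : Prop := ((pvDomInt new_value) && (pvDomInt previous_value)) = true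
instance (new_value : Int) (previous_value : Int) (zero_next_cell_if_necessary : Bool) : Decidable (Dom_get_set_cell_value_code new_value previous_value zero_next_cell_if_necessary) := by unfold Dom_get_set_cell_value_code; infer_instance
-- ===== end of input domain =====

-- B replaces A's O(offset) scan for the best (a,b,c) by an O(√offset) walk over the constant-quotient
-- blocks of offset//i and picks the winning string by an arithmetic length comparison. Objective: faster.

-- ===== PORT A =====
-- Strings are built as List Char and packed with String.mk at the very end (Lean's own String ops are
-- kernel-opaque). Python `char * n` with a 1-character string char and n = a Nat is List.replicate n char.
-- After `offset = abs(offset)` all Python ints involved are ≥ 0, where Nat `/`, `%` are exact, and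
-- range(1, offset//2 + 1) is List.range' 1 (offset / 2).
def gsc_get_abc (offset : Nat) : Nat × Nat × Nat :=
  let st := (List.range' 1 (offset / 2)).foldl
    (fun (st : Nat × Nat × Nat × Nat) i =>
      let a := i
      let b := offset / i
      let c := offset % i
      let s := a + b + c
      if s < st.2.2.2 then (a, b, c, s) else st)
    (offset, 1, 0, offset + 1)
  (st.1, st.2.1, st.2.2.1)

def get_set_cell_value_code (new_value : Int) (previous_value : Int) (zero_next_cell_if_necessary : Bool) : String :=
  let offset0 := new_value - previous_value
  let ch : Char := if offset0 > 0 then '+' else '-'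
  let offset := offset0.natAbs
  let naive := List.replicate offset ch
  let abc := gsc_get_abc offset
  let a := abc.1
  let b := abc.2.1
  let c := abc.2.2
  let looped : List Char := ['>']
  let looped := looped ++ (if zero_next_cell_if_necessary then ['[', '-', ']'] else [])
  let looped := looped ++ List.replicate a '+'
  let looped := looped ++ (['[', '-', '<'] ++ List.replicate b ch ++ ['>', ']'])
  let looped := looped ++ ['<']
  let looped := looped ++ List.replicate c ch
  if naive.length < looped.length then String.mk naive else String.mk looped

-- ===== PORT B =====
-- termination helper for the block walk (the next block starts strictly right of the current one)
lemma gsc_blocks_dec (offset i : Nat) (h : i ≤ offset / 2) :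
    offset / 2 + 1 - (min (offset / (offset / i)) (offset / 2) + 1) < offset / 2 + 1 - i := by
  rcases Nat.eq_zero_or_pos i with hi | hi
  · subst hi; simp
  · have h1 : i ≤ offset := le_trans h (Nat.div_le_self _ _)
    have hq : 0 < offset / i := Nat.div_pos h1 hi
    have h2 : i ≤ offset / (offset / i) :=
      (Nat.le_div_iff_mul_le hq).mpr (by rw [Nat.mul_comm]; exact Nat.div_mul_le_self offset i)
    have h3 : i ≤ min (offset / (offset / i)) (offset / 2) := le_min h2 h
    omega

-- `while i <= n` loop of Source B (n = offset // 2), state = (best_a, best_b, best_c, best_sum)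
def gsc_blocks (offset i : Nat) (st : Nat × Nat × Nat × Nat) : Nat × Nat × Nat × Nat :=
  if h : i ≤ offset / 2 then
    let q := offset / i
    let j := min (offset / q) (offset / 2)
    let s := j + q + offset % j
    gsc_blocks offset (j + 1) (if s < st.2.2.2 then (j, q, offset % j, s) else st)
  else st
termination_by offset / 2 + 1 - i
decreasing_by exact gsc_blocks_dec offset i h

def get_set_cell_value_code_alt (new_value : Int) (previous_value : Int) (zero_next_cell_if_necessary : Bool) : String :=
  let offset0 := new_value - previous_value
  let ch : Char := if offset0 > 0 then '+' else '-'
  let offset := offset0.natAbs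
  let st := gsc_blocks offset 1 (offset, 1, 0, offset + 1)
  let a := st.1
  let b := st.2.1
  let c := st.2.2.1
  let pre : List Char := if zero_next_cell_if_necessary then ['>', '[', '-', ']'] else ['>']
  let loopedLen := pre.length + a + 3 + b + 2 + 1 + c
  if offset < loopedLen then String.mk (List.replicate offset ch)
  else String.mk (pre ++ (((List.replicate a '+' ++ ['[', '-', '<']) ++ List.replicate b ch) ++ (['>', ']', '<'] ++ List.replicate c ch)))

-- ===== PRECONDITION & SPEC =====
def Spec_get_set_cell_value_code (new_value : Int) (previous_value : Int) (zero_next_cell_if_necessary : Bool) (out : String) : Prop := out = get_set_cell_value_code_alt new_value previous_value zero_next_cell_if_necessary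
instance (new_value : Int) (previous_value : Int) (zero_next_cell_if_necessary : Bool) (out : String) : Decidable (Spec_get_set_cell_value_code new_value previous_value zero_next_cell_if_necessary out) := by unfold Spec_get_set_cell_value_code; infer_instance

-- ===== CLAIM (what is proved, stated in full; the proofs are below) =====
def Claim_equal_get_set_cell_value_code : Prop := ∀ (new_value : Int) (previous_value : Int) (zero_next_cell_if_necessary : Bool), Dom_get_set_cell_value_code new_value previous_value zero_next_cell_if_necessary → Spec_get_set_cell_value_code new_value previous_value zero_next_cell_if_necessary (get_set_cell_value_code new_value previous_value zero_next_cell_if_necessary)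

-- ===== LEMMAS AND PROOFS =====

-- cost of choosing loop counter k
def gscF (offset k : Nat) : Nat := k + offset / k + offset % k

-- the running best, abstracted to "no candidate yet / candidate k"
def gscCost (offset : Nat) : Option Nat → Nat
  | none => offset + 1
  | some k => gscF offset k

def gscStep (offset : Nat) (b : Option Nat) (k : Nat) : Option Nat :=
  if gscF offset k < gscCost offset b then some k else b

def gscS (offset : Nat) : Option Nat → Nat × Nat × Nat × Nat
  | none => (offset, 1, 0, offset + 1)
  | some k => (k, offset / k, offset % k, gscF offset k)

lemma gscS_last (offset : Nat) (b : Option Nat) : (gscS offset b).2.2.2 = gscCost offset b := by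
  cases b <;> rfl

-- one step of A's loop, through the state abstraction gscS
lemma gsc_step_eq (offset : Nat) (b : Option Nat) (k : Nat) :
    (let a := k
     let b' := offset / k
     let c := offset % k
     let s := a + b' + c
     if s < (gscS offset b).2.2.2 then (a, b', c, s) else gscS offset b)
      = gscS offset (gscStep offset b k) := by
  simp only [gscS_last, gscStep, gscF]
  split <;> rfl

-- A's loop is the gscStep fold, through the state abstraction gscS
lemma gsc_fold_eq (offset : Nat) (l : List Nat) : ∀ (b : Option Nat),
    l.foldl (fun (st : Nat × Nat × Nat × Nat) i =>
      let a := i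
      let b := offset / i
      let c := offset % i
      let s := a + b + c
      if s < st.2.2.2 then (a, b, c, s) else st) (gscS offset b)
      = gscS offset (l.foldl (gscStep offset) b) := by
  induction l with
  | nil => intro b; rfl
  | cons x xs ih =>
    intro b
    rw [List.foldl_cons, List.foldl_cons, gsc_step_eq, ih]

lemma gsc_abc_eq (offset : Nat) :
    gsc_get_abc offset =
      (let st := gscS offset ((List.range' 1 (offset / 2)).foldl (gscStep offset) none)
       (st.1, st.2.1, st.2.2.1)) := by
  unfold gsc_get_abc
  rw [show ((offset, 1, 0, offset + 1) : Nat × Nat × Nat × Nat) = gscS offset none from rfl,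
    gsc_fold_eq]

-- inside a block all quotients agree
lemma gsc_div_const (offset i k : Nat) (h1 : 1 ≤ i) (h2 : i ≤ k)
    (h3 : k ≤ offset / (offset / i)) (h4 : i ≤ offset) : offset / k = offset / i := by
  have hk0 : 0 < k := lt_of_lt_of_le h1 h2
  have hq : 0 < offset / i := Nat.div_pos h4 h1
  apply le_antisymm
  · exact Nat.div_le_div_left h2 h1
  · exact (Nat.le_div_iff_mul_le hk0).mpr
      (by rw [Nat.mul_comm]; exact (Nat.le_div_iff_mul_le hq).mp h3)

-- on [1, offset/2] the quotient is at least 2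
lemma gsc_q2 (offset i : Nat) (h1 : 1 ≤ i) (h2 : i ≤ offset / 2) : 2 ≤ offset / i := by
  have h3 : i * 2 ≤ offset := (Nat.le_div_iff_mul_le (by norm_num)).mp h2
  exact (Nat.le_div_iff_mul_le h1).mpr (by omega)

-- the cost drops at each step inside a block
lemma gsc_f_succ (offset i k : Nat) (h1 : 1 ≤ i) (h2 : i ≤ k)
    (h3 : k + 1 ≤ offset / (offset / i)) (hq2 : 2 ≤ offset / i) (h5 : i ≤ offset) :
    gscF offset (k + 1) < gscF offset k := by
  have e1 : offset / k = offset / i := gsc_div_const offset i k h1 h2 (by omega) h5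
  have e2 : offset / (k + 1) = offset / i := gsc_div_const offset i (k + 1) h1 (by omega) h3 h5
  have m1 := Nat.mod_add_div offset k
  have m2 := Nat.mod_add_div offset (k + 1)
  rw [e1] at m1
  rw [e2] at m2
  have e3 : (k + 1) * (offset / i) = k * (offset / i) + offset / i := by ring
  unfold gscF
  rw [e1, e2]
  omega

-- the cost is strictly decreasing inside a block
lemma gsc_f_lt (offset i k j : Nat) (h1 : 1 ≤ i) (h2 : i ≤ k) (h3 : k < j)
    (h4 : j ≤ offset / (offset / i)) (hq2 : 2 ≤ offset / i) (h5 : i ≤ offset) :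
    gscF offset j < gscF offset k := by
  have main : ∀ m, k < m → m ≤ offset / (offset / i) → gscF offset m < gscF offset k := by
    intro m
    induction m with
    | zero => omega
    | succ m ih =>
      intro hm1 hm2
      rcases Nat.lt_succ_iff_lt_or_eq.mp hm1 with h | h
      · exact lt_trans (gsc_f_succ offset i m h1 (by omega) hm2 hq2 h5) (ih h (by omega))
      · subst h; exact gsc_f_succ offset i k h1 h2 hm2 hq2 h5
  exact main j h3 h4

-- folding gscStep over a range whose last element beats all others is one step on that element
lemma gsc_block_fold (offset : Nat) : ∀ (d i : Nat) (b : Option Nat),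
    (∀ k, i ≤ k → k < i + d → gscF offset (i + d) < gscF offset k) →
    (List.range' i (d + 1)).foldl (gscStep offset) b = gscStep offset b (i + d) := by
  intro d
  induction d with
  | zero =>
    intro i b _
    simp [List.range'_succ]
  | succ d ih =>
    intro i b hmin
    rw [List.range'_succ, List.foldl_cons]
    have h1 : i + 1 + d = i + (d + 1) := by omega
    rw [ih (i + 1) (gscStep offset b i)
      (fun k hk1 hk2 => by rw [h1]; exact hmin k (by omega) (by omega))]
    rw [h1]
    have hfi : gscF offset (i + (d + 1)) < gscF offset i := hmin i le_rfl (by omega)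
    by_cases hb : gscF offset i < gscCost offset b
    · have hin : gscStep offset b i = some i := by unfold gscStep; rw [if_pos hb]
      rw [hin]
      unfold gscStep
      rw [if_pos (show gscF offset (i + (d + 1)) < gscCost offset (some i) from hfi),
          if_pos (lt_trans hfi hb)]
    · have hin : gscStep offset b i = b := by unfold gscStep; rw [if_neg hb]
      rw [hin]

-- B's block walk computes the same fold as A's full scan
lemma gsc_blocks_eq (offset i : Nat) (b : Option Nat) (hi : 1 ≤ i) :
    gsc_blocks offset i (gscS offset b) =
      gscS offset ((List.range' i (offset / 2 + 1 - i)).foldl (gscStep offset) b) := by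
  by_cases h : i ≤ offset / 2
  · have h5 : i ≤ offset := le_trans h (Nat.div_le_self _ _)
    have hq0 : 0 < offset / i := Nat.div_pos h5 hi
    have hq2 : 2 ≤ offset / i := gsc_q2 offset i hi h
    have hij : i ≤ min (offset / (offset / i)) (offset / 2) :=
      le_min ((Nat.le_div_iff_mul_le hq0).mpr
        (by rw [Nat.mul_comm]; exact Nat.div_mul_le_self offset i)) h
    set q := offset / i with hqdef
    set j := min (offset / q) (offset / 2) with hjdef
    have hjn : j ≤ offset / 2 := min_le_right _ _
    have hjM : j ≤ offset / (offset / i) := min_le_left _ _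
    have hdj : offset / j = q := gsc_div_const offset i j hi hij hjM h5
    have hFj : gscF offset j = j + q + offset % j := by unfold gscF; rw [hdj]
    rw [gsc_blocks]
    simp only [dif_pos h]
    rw [← hqdef, ← hjdef]
    have hstate :
        (if j + q + offset % j < (gscS offset b).2.2.2
         then (j, q, offset % j, j + q + offset % j) else gscS offset b)
          = gscS offset (gscStep offset b j) := by
      rw [gscS_last, ← hFj]
      unfold gscStep
      split
      · simp [gscS, hdj, hFj]
      · rfl
    rw [hstate, gsc_blocks_eq offset (j + 1) (gscStep offset b j) (by omega)]
    have hsplit : List.range' i (j + 1 - i) ++ List.range' (j + 1) (offset / 2 - j)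
        = List.range' i (offset / 2 + 1 - i) := by
      have happ := List.range'_append (s := i) (m := j + 1 - i) (n := offset / 2 - j) (step := 1)
      rw [show i + 1 * (j + 1 - i) = j + 1 by omega] at happ
      rw [show j + 1 - i + (offset / 2 - j) = offset / 2 + 1 - i by omega] at happ
      exact happ
    rw [← hsplit, List.foldl_append]
    have hblock : (List.range' i (j + 1 - i)).foldl (gscStep offset) b = gscStep offset b j := by
      have hfold := gsc_block_fold offset (j - i) i b (fun k hk1 hk2 => by
        rw [show i + (j - i) = j by omega]
        exact gsc_f_lt offset i k j hi hk1 (by omega) hjM hq2 h5)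
      rw [show j - i + 1 = j + 1 - i by omega, show i + (j - i) = j by omega] at hfold
      exact hfold
    rw [hblock, show offset / 2 + 1 - (j + 1) = offset / 2 - j by omega]
  · rw [gsc_blocks, dif_neg h, show offset / 2 + 1 - i = 0 by omega]
    simp
termination_by offset / 2 + 1 - i
decreasing_by exact gsc_blocks_dec offset i h

-- ===== VERDICT (by name: the statement is the Claim_ definition above) =====

theorem get_set_cell_value_code_spec : Claim_equal_get_set_cell_value_code := by
  intro nv pv z _
  unfold Spec_get_set_cell_value_code
  have habc := gsc_abc_eq (nv - pv).natAbs
  have hblocks := gsc_blocks_eq (nv - pv).natAbs 1 none le_rfl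
  simp only [show (nv - pv).natAbs / 2 + 1 - 1 = (nv - pv).natAbs / 2 from by omega] at hblocks
  simp only [get_set_cell_value_code, get_set_cell_value_code_alt,
    show (((nv - pv).natAbs, 1, 0, (nv - pv).natAbs + 1) : Nat × Nat × Nat × Nat)
      = gscS (nv - pv).natAbs none from rfl, hblocks, habc]
  cases z <;>
    simp [List.length_append, List.length_replicate, List.append_assoc] <;>
    split <;> simp_all <;> omega
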